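-- pv_equiv track=rewrite | github.com/zhansoft/pythoncourseh200 | Assignment8/rec.py | bm
-- ===== SOURCE A (Python) =====
-- def even(x):
--      #TO DO: IMPLEMENT
--      return x % 2 == 0
--
-- d = {2:0,1:0}
--
-- def bm(n):
--      #TO DO: IMPLEMENT
--      if n in d.keys():
--           return d[n]
--      else:
--           for x in range(3, n+1):
--                if even(x):
--                     d[x] = x - 1 + d[x-1]
--                else:
--                     d[x] = x**2 +1 + d[x-1]
--           return d[n]
-- ===== SOURCE B (Python) =====
-- def even(x):
--     return x % 2 == 0
--
-- def bm(n):
--     # closed form: sum over x in 3..n of (x-1 if x even else x**2+1)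
--     # odds 2j+1 (j=1..K, K=(n-1)//2) contribute (2j+1)**2+1; evens 2i (i=2..M, M=n//2) contribute 2i-1
--     if n < 3:
--         return 0
--     K = (n - 1) // 2
--     M = n // 2
--     return 2 * K * (K + 1) * (2 * K + 1) // 3 + 2 * K * (K + 1) + 2 * K + M * M - 1
-- ===== Notes on version B (the rewrite author's own statement) =====
-- stated objective: faster
-- what changed: Replaces the memoized O(n) even/odd recurrence loop with an O(1) closed-form polynomial (sum of odd squares plus an arithmetic series).
-- outside the precondition, e.g. on bm(0): A raises KeyError, B returns 0
import Mathlib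
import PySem

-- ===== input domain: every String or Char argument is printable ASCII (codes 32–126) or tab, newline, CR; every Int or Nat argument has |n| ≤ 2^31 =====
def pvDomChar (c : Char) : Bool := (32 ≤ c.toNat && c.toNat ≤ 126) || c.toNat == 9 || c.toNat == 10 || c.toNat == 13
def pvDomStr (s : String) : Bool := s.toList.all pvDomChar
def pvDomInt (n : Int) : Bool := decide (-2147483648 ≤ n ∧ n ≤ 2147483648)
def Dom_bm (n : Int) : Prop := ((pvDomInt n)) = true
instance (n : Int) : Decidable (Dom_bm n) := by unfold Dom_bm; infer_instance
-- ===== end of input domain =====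

-- B replaces A's memoized O(n) even/odd recurrence loop with a closed-form polynomial.
-- A memoizes in a module-level dict (a side effect the caller could observe); the equivalence
-- proved here is about the RETURN value only, which depends only on n.

-- ===== PORT A =====
def bmEven (x : Int) : Bool := PySem.Int.mod x 2 == 0

-- A's dict (int keys) as a hash map: same insert/lookup steps, O(1) each so the port evaluates
def bmD0 : Std.HashMap Int Int := (Std.HashMap.emptyWithCapacity.insert 2 0).insert 1 0

-- the for-loop's body; d[n] at the end is getD with default 0, exact under Pre_bm (key present)
def bmStep (d : Std.HashMap Int Int) (x : Int) : Std.HashMap Int Int :=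
  if bmEven x then d.insert x (x - 1 + d.getD (x - 1) 0)
  else d.insert x (x ^ 2 + 1 + d.getD (x - 1) 0)

def bm (n : Int) : Int :=
  if bmD0.contains n then bmD0.getD n 0
  else
    let d := (PySem.List.pyRange 3 (n + 1) 1).foldl bmStep bmD0
    d.getD n 0

-- ===== PORT B =====
def bm_alt (n : Int) : Int :=
  if n < 3 then 0
  else
    let K := PySem.Int.floordiv (n - 1) 2
    let M := PySem.Int.floordiv n 2
    PySem.Int.floordiv (2 * K * (K + 1) * (2 * K + 1)) 3 + 2 * K * (K + 1) + 2 * K + M * M - 1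

-- ===== PRECONDITION & SPEC =====
-- Pre_ excludes n ≤ 0, where A raises KeyError (the loop is empty and n misses the {1:0,2:0} memo).
def Pre_bm (n : Int) : Prop := 1 ≤ n
instance (n : Int) : Decidable (Pre_bm n) := by unfold Pre_bm; infer_instance
def pvWitness_bm : Int := 7

def Spec_bm (n : Int) (out : Int) : Prop := out = bm_alt n
instance (n : Int) (out : Int) : Decidable (Spec_bm n out) := by unfold Spec_bm; infer_instance

-- ===== CLAIM (what is proved, stated in full; the proofs are below) =====
def Claim_equal_bm : Prop := ∀ (n : Int), Dom_bm n → Pre_bm n → Spec_bm n (bm n)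

-- ===== LEMMAS AND PROOFS =====

-- 3 ∣ K(K+1)(2K+1) (it is six times the sum of the first K squares)
lemma bm_three_dvd (K : Int) : (3 : Int) ∣ K * (K + 1) * (2 * K + 1) := by
  have h : K % 3 = 0 ∨ K % 3 = 1 ∨ K % 3 = 2 := by omega
  obtain ⟨q, hq⟩ : ∃ q, K = 3 * q + K % 3 := ⟨K / 3, by omega⟩
  rcases h with h | h | h <;> rw [hq, h]
  · exact ⟨(3 * q + 0 + 1) * (2 * (3 * q + 0) + 1) * q, by ring⟩
  · exact ⟨(3 * q + 1) * (3 * q + 2) * (2 * q + 1), by ring⟩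
  · exact ⟨(3 * q + 2) * (q + 1) * (2 * (3 * q + 2) + 1), by ring⟩

-- the closed form without the n < 3 guard
def bmCF (n : Int) : Int :=
  PySem.Int.floordiv (2 * (PySem.Int.floordiv (n - 1) 2) * (PySem.Int.floordiv (n - 1) 2 + 1) * (2 * (PySem.Int.floordiv (n - 1) 2) + 1)) 3
    + 2 * (PySem.Int.floordiv (n - 1) 2) * (PySem.Int.floordiv (n - 1) 2 + 1)
    + 2 * (PySem.Int.floordiv (n - 1) 2) + (PySem.Int.floordiv n 2) * (PySem.Int.floordiv n 2) - 1

lemma bmCF_div (K : Int) :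
    PySem.Int.floordiv (2 * K * (K + 1) * (2 * K + 1)) 3 = 2 * (K * (K + 1) * (2 * K + 1) / 3) := by
  obtain ⟨c, hc⟩ := bm_three_dvd K
  have h2 : 2 * K * (K + 1) * (2 * K + 1) = 3 * (2 * c) := by linear_combination 2 * hc
  rw [h2, hc, PySem.Int.floordiv_eq_ediv_of_pos (by norm_num)]
  omega

lemma bm_alt_eq_cf (n : Int) (h : 2 ≤ n) : bm_alt n = bmCF n := by
  by_cases h3 : n < 3
  · have hn : n = 2 := by omega
    subst hn; decide
  · simp [bm_alt, bmCF, h3]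

lemma bmCF_rec (m : Int) (h : 2 ≤ m) :
    bmCF (m + 1) = bmCF m + (if bmEven (m + 1) then m + 1 - 1 else (m + 1) ^ 2 + 1) := by
  rcases Int.even_or_odd m with ⟨a, ha⟩ | ⟨a, ha⟩
  · -- m = 2a, m+1 odd
    have ha' : m = 2 * a := by omega
    have hK : PySem.Int.floordiv (m - 1) 2 = a - 1 := by
      rw [PySem.Int.floordiv_eq_ediv_of_pos (by norm_num)]; omega
    have hK' : PySem.Int.floordiv (m + 1 - 1) 2 = a := by
      rw [PySem.Int.floordiv_eq_ediv_of_pos (by norm_num)]; omega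
    have hM : PySem.Int.floordiv m 2 = a := by
      rw [PySem.Int.floordiv_eq_ediv_of_pos (by norm_num)]; omega
    have hM' : PySem.Int.floordiv (m + 1) 2 = a := by
      rw [PySem.Int.floordiv_eq_ediv_of_pos (by norm_num)]; omega
    have hev : bmEven (m + 1) = false := by
      simp [bmEven, PySem.Int.mod_eq_emod_of_pos]; omega
    obtain ⟨c, hc⟩ := bm_three_dvd (a - 1)
    obtain ⟨c', hc'⟩ := bm_three_dvd a
    have e1 := bmCF_div (a - 1)
    have e2 := bmCF_div a
    rw [hc] at e1; rw [hc'] at e2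
    have hcc : c' - c = 2 * a ^ 2 := by nlinarith [hc, hc']
    simp only [hev, Bool.false_eq_true, if_false]
    simp only [bmCF, hK, hK', hM, hM']
    rw [show (2:Int) * (a - 1) * (a - 1 + 1) * (2 * (a - 1) + 1) = 2 * (3 * c) by nlinarith [hc],
        show (2:Int) * a * (a + 1) * (2 * a + 1) = 2 * (3 * c') by nlinarith [hc']] at *
    rw [show (2:Int) * (3 * c) = 3 * (2 * c) by ring, show (2:Int) * (3 * c') = 3 * (2 * c') by ring,
        PySem.Int.floordiv_eq_ediv_of_pos (show (0:Int) < 3 by norm_num),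
        PySem.Int.floordiv_eq_ediv_of_pos (show (0:Int) < 3 by norm_num)]
    have d1 : (3 : Int) * (2 * c) / 3 = 2 * c := by omega
    have d2 : (3 : Int) * (2 * c') / 3 = 2 * c' := by omega
    rw [d1, d2]; nlinarith [hcc, ha']
  · -- m = 2a+1, m+1 even
    have hK : PySem.Int.floordiv (m - 1) 2 = a := by
      rw [PySem.Int.floordiv_eq_ediv_of_pos (by norm_num)]; omega
    have hK' : PySem.Int.floordiv (m + 1 - 1) 2 = a := by
      rw [PySem.Int.floordiv_eq_ediv_of_pos (by norm_num)]; omega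
    have hM : PySem.Int.floordiv m 2 = a := by
      rw [PySem.Int.floordiv_eq_ediv_of_pos (by norm_num)]; omega
    have hM' : PySem.Int.floordiv (m + 1) 2 = a + 1 := by
      rw [PySem.Int.floordiv_eq_ediv_of_pos (by norm_num)]; omega
    have hev : bmEven (m + 1) = true := by
      simp [bmEven, PySem.Int.mod_eq_emod_of_pos]; omega
    simp only [hev, if_true]
    simp only [bmCF, hK, hK', hM, hM']
    ring_nf
    linarith [ha]

def bmFold (n : Int) : Std.HashMap Int Int := (PySem.List.pyRange 3 (n + 1) 1).foldl bmStep bmD0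

lemma bmFold_getD (k : Nat) :
    (bmFold ((k : Int) + 2)).getD ((k : Int) + 2) 0 = bmCF ((k : Int) + 2) := by
  induction k with
  | zero =>
    simp only [bmFold]
    rw [show ((0:Nat):Int) + 2 + 1 = 3 by norm_num,
        PySem.List.pyRange_one_eq_nil (by norm_num)]
    simp [bmD0, Std.HashMap.getD_insert, bmCF]
  | succ k ih =>
    have hm : ((k + 1 : Nat) : Int) + 2 = ((k : Int) + 2) + 1 := by push_cast; ring
    rw [hm]
    set m : Int := (k : Int) + 2 with hmdef
    have h2 : 2 ≤ m := by omega
    have hfold : bmFold (m + 1) = bmStep (bmFold m) (m + 1) := by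
      simp only [bmFold]
      rw [PySem.List.pyRange_one_succ_right (by omega)]
      rw [List.foldl_append]
      rfl
    rw [hfold, bmStep]
    by_cases hev : bmEven (m + 1)
    · simp only [hev, if_true]
      rw [Std.HashMap.getD_insert_self]
      rw [show m + 1 - 1 = m by ring, ih]
      rw [bmCF_rec m h2, hev]
      simp only [if_true]
      ring
    · simp only [hev, if_false, Bool.false_eq_true]
      rw [Std.HashMap.getD_insert_self]
      rw [show m + 1 - 1 = m by ring, ih]
      rw [bmCF_rec m h2]
      simp only [hev, Bool.false_eq_true, if_false]
      ring

-- ===== VERDICT (by name: the statement is the Claim_ definition above) =====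
theorem bm_spec : Claim_equal_bm := by
  intro n _ hpre
  unfold Spec_bm bm
  by_cases hc : bmD0.contains n
  · have hn : n = 1 ∨ n = 2 := by
      simp [bmD0, Std.HashMap.contains_insert] at hc
      omega
    rcases hn with h | h <;> subst h <;>
      simp [bmD0, Std.HashMap.getD_insert, bm_alt]
  · simp only [hc, if_false, Bool.false_eq_true]
    have h3 : 3 ≤ n := by
      by_contra h
      have : n = 1 ∨ n = 2 := by unfold Pre_bm at hpre; omega
      rcases this with h' | h' <;> subst h' <;>
        simp [bmD0, Std.HashMap.contains_insert] at hc
    obtain ⟨k, hk⟩ : ∃ k : Nat, n = (k : Int) + 2 := ⟨(n - 2).toNat, by omega⟩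
    subst hk
    have := bmFold_getD k
    rw [bm_alt_eq_cf _ (by omega)]
    exact this
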